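-- pv_equiv track=rewrite | github.com/noyo12394/Cat-411-Project-Northridge-Bridge | scripts/run_fragility_target_ml_study.py | source_feature_from_encoded
-- ===== SOURCE A (Python) =====
-- def source_feature_from_encoded(encoded: str, source_features: list[str]) -> str:
--     if encoded.startswith("num__"):
--         return encoded.split("__", 1)[1]
--     if encoded.startswith("cat__"):
--         name = encoded.split("__", 1)[1]
--         for feature in sorted(source_features, key=len, reverse=True):
--             if name == feature or name.startswith(feature + "_"):
--                 return feature
--         return name
--     return encoded
-- ===== SOURCE B (Python) =====
-- def source_feature_from_encoded(encoded: str, source_features: list[str]) -> str: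
--     if encoded.startswith("num__"):
--         return encoded.split("__", 1)[1]
--     if not encoded.startswith("cat__"):
--         return encoded
--     name = encoded.split("__", 1)[1]
--     candidates = [f for f in source_features if name == f or name.startswith(f + "_")]
--     return max(candidates, key=len) if candidates else name
-- ===== Notes on version B (the rewrite author's own statement) =====
-- stated objective: simpler
-- what changed: The cat__ branch no longer sorts: it filters the matching features in one pass and returns the longest via max(key=len) (first maximal, which coincides because any two equal-length matchers are the same string), falling back to name.
import Mathlib
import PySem

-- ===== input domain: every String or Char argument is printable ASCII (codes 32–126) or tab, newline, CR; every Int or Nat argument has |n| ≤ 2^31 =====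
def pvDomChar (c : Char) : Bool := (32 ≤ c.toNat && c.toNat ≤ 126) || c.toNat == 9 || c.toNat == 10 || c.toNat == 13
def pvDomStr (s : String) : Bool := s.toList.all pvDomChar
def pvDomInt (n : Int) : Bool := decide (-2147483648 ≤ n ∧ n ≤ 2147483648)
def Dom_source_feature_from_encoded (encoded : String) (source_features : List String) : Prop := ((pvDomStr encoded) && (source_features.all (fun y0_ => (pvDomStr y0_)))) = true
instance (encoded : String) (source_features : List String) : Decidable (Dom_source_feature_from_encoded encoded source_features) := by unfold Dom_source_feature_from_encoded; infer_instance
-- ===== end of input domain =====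

-- B drops A's sort of source_features: it filters the matching features in one pass and
-- returns the longest match via max(key=len); equal return values, simpler shape.

-- encoded.split("__", 1)[1]; the [1] index always exists where the ports use it
-- (the string then starts with "num__"/"cat__", so "__" occurs and split has 2 parts).
def pvName (encoded : String) : String :=
  ((PySem.Str.splitMax? encoded "__" 1).getD []).getD 1 ""

-- ===== PORT A =====
-- the for-loop: first feature matching name, else name
def pvLoopA (name : String) : List String → String
  | [] => name
  | f :: rest =>
      if name == f || PySem.Str.startswith name (f ++ "_") then f else pvLoopA name rest

def source_feature_from_encoded (encoded : String) (source_features : List String) : String :=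
  if PySem.Str.startswith encoded "num__" then
    pvName encoded
  else if PySem.Str.startswith encoded "cat__" then
    pvLoopA (pvName encoded) (PySem.List.sorted source_features (fun f => PySem.Str.len f) true)
  else encoded

-- ===== PORT B =====
def source_feature_from_encoded_alt (encoded : String) (source_features : List String) : String :=
  if PySem.Str.startswith encoded "num__" then
    pvName encoded
  else if !(PySem.Str.startswith encoded "cat__") then encoded
  else
    let name := pvName encoded
    let candidates := source_features.filter
      (fun f => name == f || PySem.Str.startswith name (f ++ "_"))
    match PySem.List.max? candidates (fun f => PySem.Str.len f) with
    | some m => m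
    | none => name

-- ===== PRECONDITION & SPEC =====
def Spec_source_feature_from_encoded (encoded : String) (source_features : List String) (out : String) : Prop := out = source_feature_from_encoded_alt encoded source_features
instance (encoded : String) (source_features : List String) (out : String) : Decidable (Spec_source_feature_from_encoded encoded source_features out) := by unfold Spec_source_feature_from_encoded; infer_instance

-- ===== CLAIM (what is proved, stated in full; the proofs are below) =====
def Claim_equal_source_feature_from_encoded : Prop := ∀ (encoded : String) (source_features : List String), Dom_source_feature_from_encoded encoded source_features → Spec_source_feature_from_encoded encoded source_features (source_feature_from_encoded encoded source_features)

-- ===== LEMMAS AND PROOFS =====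

-- the match predicate of the cat__ branch
def pvP (name f : String) : Bool := name == f || PySem.Str.startswith name (f ++ "_")

lemma pvLoopA_cons (name f : String) (t : List String) :
    pvLoopA name (f :: t) =
      if (name == f || PySem.Str.startswith name (f ++ "_")) = true then f
      else pvLoopA name t := rfl

-- any matcher is a prefix (as a char list) of name
lemma pvP_prefix (name f : String) (h : pvP name f = true) : f.toList <+: name.toList := by
  unfold pvP at h
  rcases Bool.or_eq_true_iff.mp h with h1 | h1
  · rw [show f = name from (beq_iff_eq.mp h1).symm]
  · rw [PySem.Str.startswith_eq] at h1
    have := (PySem.Chars.startswith_iff _ _).mp h1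
    exact List.IsPrefix.trans ⟨['_'], rfl⟩ (by simpa using this)

-- two matchers of equal length are the same string
lemma pvP_uniq (name f g : String) (hf : pvP name f = true) (hg : pvP name g = true)
    (hlen : f.toList.length = g.toList.length) : f = g := by
  have h1 := List.prefix_iff_eq_take.mp (pvP_prefix name f hf)
  have h2 := List.prefix_iff_eq_take.mp (pvP_prefix name g hg)
  have : f.toList = g.toList := by rw [h1, h2, hlen]
  exact String.toList_injective this

lemma pvLen_eq_of_le_le {f g : String}
    (h1 : PySem.Str.len f ≤ PySem.Str.len g) (h2 : PySem.Str.len g ≤ PySem.Str.len f) :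
    f.toList.length = g.toList.length := by
  rw [PySem.Str.len_eq, PySem.Str.len_eq] at h1 h2
  omega

-- A's first hit on a length-descending list is B's max over the filtered candidates
lemma pvLoopA_eq (name : String) : ∀ L : List String,
    L.Pairwise (fun a b => PySem.Str.len b ≤ PySem.Str.len a) →
    pvLoopA name L =
      (match PySem.List.max? (L.filter (pvP name)) (fun f => PySem.Str.len f) with
       | some m => m
       | none => name) := by
  intro L
  induction L with
  | nil => intro _; rfl
  | cons f t ih =>
    intro hpw
    rcases List.pairwise_cons.mp hpw with ⟨hhead, htail⟩
    by_cases hf : (name == f || PySem.Str.startswith name (f ++ "_")) = true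
    · have hf' : pvP name f = true := hf
      have hfilter : (f :: t).filter (pvP name) = f :: t.filter (pvP name) := by
        simp [hf']
      rw [hfilter, pvLoopA_cons, if_pos hf]
      -- max? of the nonempty candidate list is some m, and m = f by uniqueness
      rcases hm : PySem.List.max? (f :: t.filter (pvP name)) (fun f => PySem.Str.len f) with _ | m
      · exact absurd ((PySem.List.max?_eq_none_iff _ _).mp hm) (by simp)
      · have hmem := PySem.List.max?_mem hm
        have hmax := PySem.List.max?_isMax hm f (by simp)
        have hle : PySem.Str.len m ≤ PySem.Str.len f := by
          rcases List.mem_cons.mp hmem with h | h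
          · rw [h]
          · exact hhead m (List.mem_of_mem_filter h)
        have hPm : pvP name m = true := by
          rcases List.mem_cons.mp hmem with h | h
          · rw [h]; exact hf'
          · exact List.of_mem_filter h
        exact (pvP_uniq name m f hPm hf' (pvLen_eq_of_le_le hle hmax)).symm
    · have hf' : pvP name f = false := by
        unfold pvP; exact Bool.not_eq_true _ ▸ Bool.of_not_eq_true hf
      have hfilter : (f :: t).filter (pvP name) = t.filter (pvP name) := by
        simp [hf']
      rw [hfilter, pvLoopA_cons, if_neg hf, ih htail]

-- max?(key=len) over candidate lists with the same members agree (matchers of equal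
-- length coincide, so the first-maximal choice is unique)
lemma pvMax_congr (name : String) (c1 c2 : List String)
    (hmem : ∀ x, x ∈ c1 ↔ x ∈ c2) (hP : ∀ x ∈ c1, pvP name x = true) :
    PySem.List.max? c1 (fun f => PySem.Str.len f) =
    PySem.List.max? c2 (fun f => PySem.Str.len f) := by
  rcases h1 : PySem.List.max? c1 (fun f => PySem.Str.len f) with _ | m1 <;>
    rcases h2 : PySem.List.max? c2 (fun f => PySem.Str.len f) with _ | m2
  · rfl
  · have := (PySem.List.max?_eq_none_iff _ _).mp h1
    have hm2 := PySem.List.max?_mem h2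
    rw [← hmem] at hm2
    simp [this] at hm2
  · have := (PySem.List.max?_eq_none_iff _ _).mp h2
    have hm1 := PySem.List.max?_mem h1
    rw [hmem] at hm1
    simp [this] at hm1
  · have hm1 := PySem.List.max?_mem h1
    have hm2 := PySem.List.max?_mem h2
    have hP1 := hP m1 hm1
    have hP2 := hP m2 ((hmem m2).mpr hm2)
    have hle1 : PySem.Str.len m1 ≤ PySem.Str.len m2 :=
      PySem.List.max?_isMax h2 m1 ((hmem m1).mp hm1)
    have hle2 : PySem.Str.len m2 ≤ PySem.Str.len m1 :=
      PySem.List.max?_isMax h1 m2 ((hmem m2).mpr hm2)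
    rw [pvP_uniq name m1 m2 hP1 hP2 (pvLen_eq_of_le_le hle1 hle2)]

-- ===== VERDICT (by name: the statement is the Claim_ definition above) =====
theorem source_feature_from_encoded_spec : Claim_equal_source_feature_from_encoded := by
  unfold Claim_equal_source_feature_from_encoded
  intro encoded source_features _
  unfold Spec_source_feature_from_encoded
  unfold source_feature_from_encoded source_feature_from_encoded_alt
  cases hn : PySem.Str.startswith encoded "num__" with
  | true => rfl
  | false =>
    cases hc : PySem.Str.startswith encoded "cat__" with
    | false => rfl
    | true =>
      simp only [Bool.not_true, reduceIte]
      rw [pvLoopA_eq (pvName encoded) _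
        (PySem.List.sorted_pairwise_rev source_features (fun f => PySem.Str.len f))]
      rw [pvMax_congr (pvName encoded)
        ((PySem.List.sorted source_features (fun f => PySem.Str.len f) true).filter (pvP (pvName encoded)))
        (source_features.filter (pvP (pvName encoded)))
        (by intro x; simp [List.mem_filter, PySem.List.mem_sorted])
        (by intro x hx; exact List.of_mem_filter hx)]
      rfl
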